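-- pv_equiv track=rewrite | github.com/kbaikov/adventofcode2016 | advent2016_7.py | has_abba
-- ===== SOURCE A (Python) =====
-- def has_abba(s):
--     index = 0
--     while index + 3 < len(s):
--         if s[index] == s[index + 1]:
--             index += 1
--             continue
--         if s[index] == s[index + 3] and s[index + 1] == s[index + 2]:
--             return True, s[index : index + 4]
--         index += 1
--     return False, None
-- ===== SOURCE B (Python) =====
-- def has_abba(s):
--     # Candidate-generation approach: first collect the interior positions of
--     # doubled characters (the "BB" centres), then check each centre's flanking
--     # characters for the mirrored, distinct "A...A" pair.
--     centres = [j for j in range(1, len(s) - 2) if s[j] == s[j + 1]]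
--     for j in centres:
--         if s[j - 1] == s[j + 2] and s[j - 1] != s[j]:
--             return True, s[j - 1 : j + 3]
--     return False, None
-- ===== Notes on version B (the rewrite author's own statement) =====
-- stated objective: alternative
-- what changed: Instead of A's index/while scan over every 4-character window, B runs a candidate-generation stage that collects the interior positions of doubled characters (BB centres) and a verification stage that expands each centre outward to test the mirrored distinct flanking pair.
import Mathlib
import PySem

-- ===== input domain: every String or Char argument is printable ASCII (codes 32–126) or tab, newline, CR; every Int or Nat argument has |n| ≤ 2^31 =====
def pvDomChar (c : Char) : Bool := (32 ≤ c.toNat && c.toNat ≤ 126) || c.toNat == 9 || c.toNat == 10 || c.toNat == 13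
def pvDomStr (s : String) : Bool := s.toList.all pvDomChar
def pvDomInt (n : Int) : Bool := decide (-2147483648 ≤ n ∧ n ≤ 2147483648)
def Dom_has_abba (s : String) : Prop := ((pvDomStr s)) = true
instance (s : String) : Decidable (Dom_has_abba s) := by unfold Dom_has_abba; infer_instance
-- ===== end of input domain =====

-- B replaces A's window-by-window index loop by a two-stage search: collect the
-- doubled-character centres first, then verify each centre's flanking pair; same cost.

-- ===== PORT A =====
-- while index + 3 < len(s): …  — index loop; all accesses are in range because index+3 < length
def hasAbbaLoop (l : List Char) (index : Nat) : Bool × Option String :=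
  if h : index + 3 < l.length then
    if l[index]'(by omega) = l[index + 1]'(by omega) then
      hasAbbaLoop l (index + 1)                         -- index += 1; continue
    else if l[index]'(by omega) = l[index + 3]'(by omega) ∧
            l[index + 1]'(by omega) = l[index + 2]'(by omega) then
      -- return True, s[index : index + 4]  (slice fully in range = take 4 of drop index)
      (true, some (String.ofList ((l.drop index).take 4)))
    else
      hasAbbaLoop l (index + 1)                         -- index += 1
  else
    (false, none)
termination_by l.length - index

def has_abba (s : String) : Bool × Option String :=
  hasAbbaLoop s.toList 0

-- ===== PORT B =====
-- centres = [j for j in range(1, len(s) - 2) if s[j] == s[j+1]]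
-- range(1, len(s)-2) = the naturals 1 .. len-3, i.e. List.range' 1 (len - 3)
def altCentres (l : List Char) : List Nat :=
  (List.range' 1 (l.length - 3)).filter (fun j => l.getD j ' ' == l.getD (j + 1) ' ')

-- for j in centres: if s[j-1] == s[j+2] and s[j-1] != s[j]: return True, s[j-1:j+3]
-- (all indices are in range since 1 ≤ j ≤ len-3; the slice = take 4 of drop (j-1))
def altCheck (l : List Char) : List Nat → Bool × Option String
  | [] => (false, none)
  | j :: rest =>
    if l.getD (j - 1) ' ' = l.getD (j + 2) ' ' ∧ l.getD (j - 1) ' ' ≠ l.getD j ' ' then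
      (true, some (String.ofList ((l.drop (j - 1)).take 4)))
    else altCheck l rest

def has_abba_alt (s : String) : Bool × Option String :=
  altCheck s.toList (altCentres s.toList)

-- ===== PRECONDITION & SPEC =====
def Spec_has_abba (s : String) (out : Bool × Option String) : Prop := out = has_abba_alt s
instance (s : String) (out : Bool × Option String) : Decidable (Spec_has_abba s out) := by unfold Spec_has_abba; infer_instance

-- ===== CLAIM (what is proved, stated in full; the proofs are below) =====
def Claim_equal_has_abba : Prop := ∀ (s : String), Dom_has_abba s → Spec_has_abba s (has_abba s)

-- ===== LEMMAS AND PROOFS =====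

-- A's loop from index i equals B's check over the remaining centres (those ≥ i+1).
lemma loop_eq_check (l : List Char) (i : Nat) :
    hasAbbaLoop l i =
      altCheck l ((List.range' (i + 1) (l.length - 3 - i)).filter
        (fun j => l.getD j ' ' == l.getD (j + 1) ' ')) := by
  induction hn : l.length - i using Nat.strong_induction_on generalizing i with
  | _ n ih =>
  rw [hasAbbaLoop]
  by_cases h : i + 3 < l.length
  · have h0 : i < l.length := by omega
    have h1 : i + 1 < l.length := by omega
    have h2 : i + 2 < l.length := by omega
    have hlen : l.length - 3 - i = (l.length - 3 - (i + 1)) + 1 := by omega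
    have g0 : l.getD i ' ' = l[i] := List.getD_eq_getElem l ' ' h0
    have g1 : l.getD (i + 1) ' ' = l[i + 1] := List.getD_eq_getElem l ' ' h1
    have g2 : l.getD (i + 2) ' ' = l[i + 2] := List.getD_eq_getElem l ' ' h2
    have g3 : l.getD (i + 3) ' ' = l[i + 3] := List.getD_eq_getElem l ' ' h
    have hrec : hasAbbaLoop l (i + 1) =
        altCheck l ((List.range' (i + 2) (l.length - 3 - (i + 1))).filter
          (fun j => l.getD j ' ' == l.getD (j + 1) ' ')) :=
      ih (l.length - (i + 1)) (by omega) (i + 1) rfl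
    rw [hlen, List.range'_succ, List.filter_cons]
    rw [dif_pos h]
    by_cases hc : l[i + 1] = l[i + 2]
    · -- centre i+1 is a candidate
      have : (l.getD (i + 1) ' ' == l.getD (i + 1 + 1) ' ') = true := by
        rw [show i + 1 + 1 = i + 2 from rfl, g1, g2]; simp [hc]
      rw [if_pos this, altCheck]
      simp only [show i + 1 - 1 = i from rfl, show i + 1 + 2 = i + 3 from rfl, g0, g3, g1]
      by_cases hab : l[i] = l[i + 1]
      · rw [if_pos hab, if_neg (by tauto), hrec]
      · rw [if_neg hab]
        by_cases hm : l[i] = l[i + 3]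
        · rw [if_pos ⟨hm, hc.symm ▸ rfl⟩, if_pos ⟨hm, hab⟩]
        · rw [if_neg (by tauto), if_neg (by tauto), hrec]
    · -- centre i+1 is not a candidate: both sides move on
      have : ¬ ((l.getD (i + 1) ' ' == l.getD (i + 1 + 1) ' ') = true) := by
        rw [show i + 1 + 1 = i + 2 from rfl, g1, g2]; simp [hc]
      rw [if_neg this]
      by_cases hab : l[i] = l[i + 1]
      · rw [if_pos hab, hrec]
      · rw [if_neg hab, if_neg (by tauto), hrec]
  · rw [dif_neg h]
    have : l.length - 3 - i = 0 := by omega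
    rw [this]
    rfl

-- ===== VERDICT (by name: the statement is the Claim_ definition above) =====
theorem has_abba_spec : Claim_equal_has_abba := by
  intro s _
  show has_abba s = has_abba_alt s
  simpa [has_abba, has_abba_alt, altCentres] using loop_eq_check s.toList 0
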